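-- pv_equiv track=rewrite | github.com/InduChaurasia/P_AOC_2024 | src/__2025__/day2.py | invalid_product_ids2
-- ===== SOURCE A (Python) =====
-- def invalid_product_ids2(data):
--     invalid_ids=[]
--     for r in data:
--         start=int(r[0])
--         end=int(r[1])
--         for pid in range(start,end+1):
--             pid_str=str(pid)
--             l=len(pid_str)
--             for i in range(1,l//2+1):
--                 r=pid_str.replace(pid_str[:i],'')
--                 if not r:
--                     invalid_ids.append(pid)
--                     break
--     return invalid_ids
-- ===== SOURCE B (Python) =====
-- def invalid_product_ids2(data):
--     out = []
--     for start, end in data: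
--         lo = max(start, 10)
--         if end >= lo:
--             found = set()
--             max_len = len(str(end))
--             for L in range(2, max_len + 1):
--                 for d in range(1, L // 2 + 1):
--                     if L % d == 0:
--                         unit = (10 ** L - 1) // (10 ** d - 1)
--                         for block in range(10 ** (d - 1), 10 ** d):
--                             n = block * unit
--                             if lo <= n <= end:
--                                 found.add(n)
--             out.extend(sorted(found))
--     return out
-- ===== Notes on version B (the rewrite author's own statement) =====
-- stated objective: faster
-- what changed: Instead of scanning every number in each range and testing its digit string, B directly generates the repeated-block numbers as block * (10^L-1)//(10^d-1) for each digit length L up to len(str(end)) and each divisor block length d, keeps the ones inside the range in a set, and emits them sorted.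
import Mathlib
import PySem

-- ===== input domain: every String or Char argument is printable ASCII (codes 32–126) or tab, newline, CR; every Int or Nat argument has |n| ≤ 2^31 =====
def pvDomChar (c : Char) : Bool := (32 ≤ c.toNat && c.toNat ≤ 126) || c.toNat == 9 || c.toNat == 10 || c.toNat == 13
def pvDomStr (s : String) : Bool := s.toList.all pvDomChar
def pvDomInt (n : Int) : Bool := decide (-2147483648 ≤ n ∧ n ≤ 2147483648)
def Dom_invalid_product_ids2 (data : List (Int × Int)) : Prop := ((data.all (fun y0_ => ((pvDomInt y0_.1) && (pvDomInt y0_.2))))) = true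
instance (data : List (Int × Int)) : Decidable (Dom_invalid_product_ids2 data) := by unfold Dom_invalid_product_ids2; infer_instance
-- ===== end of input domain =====

-- B generates the repeated-block ("periodic-digit") numbers arithmetically per block length and
-- collects a sorted set per range, instead of A's scan of every number in the range (objective: faster on wide ranges).


-- ===== PORT A =====
-- the inner 'for i in range(...)' loop: returns true iff some prefix length makes the replace empty
-- (the loop appends pid and breaks at the first such i)
def pvInnerA (s : List Char) : List Int → Bool
  | [] => false
  | i :: is =>
      let r := PySem.Chars.replace s (PySem.List.slice s none (some i)) []
      if r.isEmpty then true else pvInnerA s is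

def invalid_product_ids2 (data : List (Int × Int)) : List Int :=
  data.foldl (fun acc r =>
    let start := r.1
    let stop := r.2
    (PySem.List.pyRange start (stop + 1) 1).foldl (fun acc pid =>
      let pidStr := PySem.Int.toChars pid
      let l : Int := pidStr.length
      if pvInnerA pidStr (PySem.List.pyRange 1 (PySem.Int.floordiv l 2 + 1) 1)
      then acc ++ [pid] else acc) acc) []

-- ===== PORT B =====
-- per range: generate each repeated-block number directly as block * (10^L-1)//(10^d-1)
def pvFindRange (lo stop : Int) : PySem.Set Int :=
  let maxLen : Int := (PySem.Int.toChars stop).length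
  (PySem.List.pyRange 2 (maxLen + 1) 1).foldl (fun found L =>
    (PySem.List.pyRange 1 (PySem.Int.floordiv L 2 + 1) 1).foldl (fun found d =>
      if PySem.Int.mod L d = 0 then
        let unit : Int := PySem.Int.floordiv (10 ^ L.toNat - 1) (10 ^ d.toNat - 1)
        (PySem.List.pyRange (10 ^ (d.toNat - 1)) (10 ^ d.toNat) 1).foldl (fun found block =>
          let n := block * unit
          if lo ≤ n ∧ n ≤ stop then PySem.Set.add found n else found) found
      else found) found) PySem.Set.empty

def invalid_product_ids2_alt (data : List (Int × Int)) : List Int :=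
  data.foldl (fun out r =>
    let lo := max r.1 10
    if r.2 ≥ lo then
      out ++ PySem.List.sorted (pvFindRange lo r.2) (fun x => x) false
    else out) []

-- ===== PRECONDITION & SPEC =====
def Spec_invalid_product_ids2 (data : List (Int × Int)) (out : List Int) : Prop := out = invalid_product_ids2_alt data
instance (data : List (Int × Int)) (out : List Int) : Decidable (Spec_invalid_product_ids2 data out) := by unfold Spec_invalid_product_ids2; infer_instance

-- ===== CLAIM (what is proved, stated in full; the proofs are below) =====
def Claim_equal_invalid_product_ids2 : Prop := ∀ (data : List (Int × Int)), Dom_invalid_product_ids2 data → Spec_invalid_product_ids2 data (invalid_product_ids2 data)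

-- ===== LEMMAS AND PROOFS =====

-- ---- A-side: the inner loop is 'some prefix length i makes the string a repetition of its prefix' ----

theorem pvInnerA_eq_any (s : List Char) (is : List Int) :
    pvInnerA s is = is.any (fun i => (PySem.Chars.replace s (PySem.List.slice s none (some i)) []).isEmpty) := by
  induction is with
  | nil => rfl
  | cons i is ih =>
      have hd : ∀ l : List Char, decide (l = []) = l.isEmpty := by intro l; cases l <;> simp
      simp [pvInnerA, ih, hd]

theorem pv_flatten_replicate_length {α : Type} (k : Nat) (p : List α) :
    ((List.replicate k p).flatten).length = k * p.length := by
  induction k with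
  | zero => simp
  | succ k ih => simp [List.replicate_succ, ih, Nat.succ_mul]; ring

theorem pv_go_empty_iff (p : List Char) (hp : p ≠ []) :
    ∀ (fuel : Nat) (l acc : List Char), l.length ≤ fuel →
      (PySem.Chars.replace.go p [] fuel l acc = [] ↔ acc = [] ∧ ∃ k, l = (List.replicate k p).flatten) := by
  intro fuel
  induction fuel with
  | zero =>
    intro l acc hl
    have hl0 : l = [] := by cases l <;> simp_all
    subst hl0
    constructor
    · intro h
      refine ⟨?_, 0, by simp⟩
      simpa [PySem.Chars.replace.go] using h
    · rintro ⟨rfl, -⟩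
      simp [PySem.Chars.replace.go]
  | succ fuel ih =>
    intro l acc hl
    cases l with
    | nil =>
      constructor
      · intro h
        refine ⟨?_, 0, by simp⟩
        simpa [PySem.Chars.replace.go] using h
      · rintro ⟨rfl, -⟩
        simp [PySem.Chars.replace.go]
    | cons c t =>
      have hplen : 1 ≤ p.length := by
        cases p with
        | nil => exact absurd rfl hp
        | cons a b => simp
      by_cases hpre : p.isPrefixOf (c :: t) = true
      · have hpfx : p <+: (c :: t) := List.isPrefixOf_iff_prefix.mp hpre
        obtain ⟨u, hu⟩ := hpfx
        have hdrop : (c :: t).drop p.length = u := by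
          rw [← hu, List.drop_left]
        have hstep : PySem.Chars.replace.go p [] (fuel + 1) (c :: t) acc
            = PySem.Chars.replace.go p [] fuel ((c :: t).drop p.length) acc := by
          simp [PySem.Chars.replace.go, hpre]
        have hulen : u.length ≤ fuel := by
          have hlen2 : p.length + u.length = t.length + 1 := by
            simpa using congrArg List.length hu
          have hl' : t.length + 1 ≤ fuel + 1 := by simpa using hl
          omega
        rw [hstep, hdrop, ih u acc hulen]
        constructor
        · rintro ⟨rfl, k, rfl⟩
          exact ⟨rfl, k + 1, by rw [← hu]; simp [List.replicate_succ]⟩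
        · rintro ⟨rfl, k, hk⟩
          cases k with
          | zero => simp at hk
          | succ k =>
            refine ⟨rfl, k, ?_⟩
            rw [List.replicate_succ, List.flatten_cons] at hk
            have : p ++ u = p ++ (List.replicate k p).flatten := by rw [hu, hk]
            exact List.append_cancel_left this
      · have hstep : PySem.Chars.replace.go p [] (fuel + 1) (c :: t) acc
            = PySem.Chars.replace.go p [] fuel t (c :: acc) := by
          simp [PySem.Chars.replace.go, hpre]
        have htlen : t.length ≤ fuel := by simp at hl; omega
        rw [hstep, ih t (c :: acc) htlen]
        constructor
        · rintro ⟨h, -⟩; cases h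
        · rintro ⟨rfl, k, hk⟩
          cases k with
          | zero => simp at hk
          | succ k =>
            rw [List.replicate_succ, List.flatten_cons] at hk
            exact absurd (List.isPrefixOf_iff_prefix.mpr ⟨(List.replicate k p).flatten, hk.symm⟩) hpre

theorem pv_replace_empty_iff (s p : List Char) (hp : p ≠ []) :
    (PySem.Chars.replace s p [] = [] ↔ ∃ k, s = (List.replicate k p).flatten) := by
  have hne : p.isEmpty = false := by cases p with
    | nil => exact absurd rfl hp
    | cons a b => rfl
  rw [PySem.Chars.replace, hne]
  simp only [Bool.false_eq_true, if_false]
  rw [pv_go_empty_iff p hp s.length s [] (le_refl _)]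
  simp

-- the A-side periodicity predicate, as a Prop on the char list
def pvPerS (s : List Char) : Prop :=
  ∃ i k : Nat, 1 ≤ i ∧ 2 * i ≤ s.length ∧ s = (List.replicate k (s.take i)).flatten

theorem pv_innerA_iff (s : List Char) :
    pvInnerA s (PySem.List.pyRange 1 (PySem.Int.floordiv (s.length : Int) 2 + 1) 1) = true ↔ pvPerS s := by
  have hfd : PySem.Int.floordiv (s.length : Int) 2 = ((s.length / 2 : Nat) : Int) := by
    exact_mod_cast PySem.Int.floordiv_natCast s.length 2
  rw [pvInnerA_eq_any, List.any_eq_true]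
  constructor
  · rintro ⟨i, hi, htest⟩
    rw [PySem.List.mem_pyRange_one, hfd] at hi
    obtain ⟨h1, h2⟩ := hi
    have h2i : 2 * i.toNat ≤ s.length := by
      have : i.toNat ≤ s.length / 2 := by omega
      omega
    have hslice : PySem.List.slice s none (some i) = s.take i.toNat := PySem.List.slice_to s (by omega)
    have hlt : (s.take i.toNat).length = i.toNat := by
      rw [List.length_take]; omega
    have hpne : s.take i.toNat ≠ [] := by
      intro h; rw [h] at hlt; simp at hlt; omega
    rw [hslice, List.isEmpty_iff, pv_replace_empty_iff _ _ hpne] at htest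
    obtain ⟨k, hk⟩ := htest
    exact ⟨i.toNat, k, by omega, h2i, hk⟩
  · rintro ⟨i, k, h1, h2, hk⟩
    refine ⟨(i : Int), ?_, ?_⟩
    · rw [PySem.List.mem_pyRange_one, hfd]
      have : i ≤ s.length / 2 := by omega
      exact ⟨by exact_mod_cast h1, by push_cast; omega⟩
    · have hslice : PySem.List.slice s none (some (i : Int)) = s.take i := by
        rw [PySem.List.slice_to s (by positivity)]
        simp
      have hlt : (s.take i).length = i := by
        rw [List.length_take]; omega
      have hpne : s.take i ≠ [] := by
        intro h; rw [h] at hlt; simp at hlt; omega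
      rw [hslice, List.isEmpty_iff, pv_replace_empty_iff _ _ hpne]
      exact ⟨k, hk⟩

-- ---- decimal digits: str(n) for n > 0 is the reversed digitChar image of Nat.digits 10 n ----

def pvBE (n : Nat) : List Char := ((Nat.digits 10 n).map Nat.digitChar).reverse

theorem pv_toDigitsCore_eq (fuel : Nat) : ∀ (n : Nat) (acc : List Char), 0 < n → n ≤ fuel →
    Nat.toDigitsCore 10 fuel n acc = ((Nat.digits 10 n).map Nat.digitChar).reverse ++ acc := by
  induction fuel with
  | zero => intro n acc h hle; omega
  | succ fuel ih =>
    intro n acc h hle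
    have hdig : Nat.digits 10 n = n % 10 :: Nat.digits 10 (n / 10) :=
      Nat.digits_def' (by norm_num) h
    by_cases h0 : n / 10 = 0
    · have : Nat.digits 10 (n / 10) = [] := by rw [h0]; simp
      rw [Nat.toDigitsCore]
      simp [h0, hdig]
    · have hrec : n / 10 ≤ fuel := by
        have := Nat.div_lt_self h (by norm_num : 1 < 10)
        omega
      rw [Nat.toDigitsCore]
      simp only [h0, if_false]
      rw [ih (n / 10) _ (Nat.pos_of_ne_zero h0) hrec, hdig]
      simp

theorem pv_toDigits_eq (n : Nat) (h : 0 < n) :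
    Nat.toDigits 10 n = ((Nat.digits 10 n).map Nat.digitChar).reverse := by
  rw [Nat.toDigits, pv_toDigitsCore_eq (n + 1) n [] h (by omega)]
  simp

theorem pv_toChars_pos (n : Nat) (h : 0 < n) : PySem.Int.toChars (n : Int) = pvBE n := by
  have hnn : ¬ ((n : Int) < 0) := by omega
  rw [PySem.Int.toChars]
  simp only [hnn, if_false, Int.toNat_natCast]
  rw [Nat.toDigits, pv_toDigitsCore_eq (n + 1) n [] h (by omega)]
  simp [pvBE]

-- digits are the chars '0'..'9'; pvCV inverts Nat.digitChar on them
def pvCV (c : Char) : Nat := c.toNat - 48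

theorem pv_CV_digitChar (d : Nat) (hd : d < 10) : pvCV (Nat.digitChar d) = d := by
  interval_cases d <;> rfl

theorem pv_digitChar_ne_dash (d : Nat) (hd : d < 10) : Nat.digitChar d ≠ '-' := by
  interval_cases d <;> decide

-- geometric repunit
def pvUnit (i k : Nat) : Nat := ∑ j ∈ Finset.range k, (10 ^ i) ^ j

theorem pv_flatten_replicate_succ' {α : Type} (k : Nat) (p : List α) :
    (List.replicate (k + 1) p).flatten = (List.replicate k p).flatten ++ p := by
  rw [List.replicate_succ', List.flatten_append]; simp

theorem pv_reverse_flatten_replicate {α : Type} (k : Nat) (p : List α) :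
    ((List.replicate k p).flatten).reverse = (List.replicate k p.reverse).flatten := by
  induction k with
  | zero => simp
  | succ k ih =>
      rw [pv_flatten_replicate_succ', List.reverse_append, ih]
      simp [List.replicate_succ]

theorem pv_unit_succ (i k : Nat) : pvUnit i (k + 1) = 10 ^ i * pvUnit i k + 1 := by
  unfold pvUnit
  rw [geom_sum_succ]

theorem pv_ofDigits_flatten (Lb : List Nat) (i k : Nat) (hlen : Lb.length = i) :
    Nat.ofDigits 10 ((List.replicate k Lb).flatten) = Nat.ofDigits 10 Lb * pvUnit i k := by
  induction k with
  | zero => simp [pvUnit]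
  | succ k ih =>
      rw [List.replicate_succ, List.flatten_cons, Nat.ofDigits_append, ih, hlen, pv_unit_succ]
      ring

theorem pv_digits_len_eq (b i : Nat) (hi : 1 ≤ i) (hb1 : 10 ^ (i - 1) ≤ b) (hb2 : b < 10 ^ i) :
    (Nat.digits 10 b).length = i := by
  have hb0 : b ≠ 0 := by
    have : 1 ≤ 10 ^ (i - 1) := Nat.one_le_pow _ _ (by norm_num)
    omega
  have hlog : Nat.log 10 b = i - 1 := by
    apply Nat.log_eq_of_pow_le_of_lt_pow hb1
    have : i - 1 + 1 = i := by omega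
    rw [this]; exact hb2
  rw [Nat.digits_len 10 b (by norm_num) hb0, hlog]
  omega

theorem pv_digits_ne_nil (b : Nat) (hb : b ≠ 0) : Nat.digits 10 b ≠ [] :=
  Nat.digits_ne_nil_iff_ne_zero.mpr hb

theorem pv_digits_flatten (b i k : Nat) (hi : 1 ≤ i) (hk : 1 ≤ k)
    (hb1 : 10 ^ (i - 1) ≤ b) (hb2 : b < 10 ^ i) :
    Nat.digits 10 (b * pvUnit i k) = (List.replicate k (Nat.digits 10 b)).flatten := by
  have hb0 : b ≠ 0 := by
    have : 1 ≤ 10 ^ (i - 1) := Nat.one_le_pow _ _ (by norm_num)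
    omega
  have hlen : (Nat.digits 10 b).length = i := pv_digits_len_eq b i hi hb1 hb2
  have hofd : Nat.ofDigits 10 ((List.replicate k (Nat.digits 10 b)).flatten) = b * pvUnit i k := by
    rw [pv_ofDigits_flatten _ i k hlen, Nat.ofDigits_digits]
  have hne : Nat.digits 10 b ≠ [] := pv_digits_ne_nil b hb0
  rw [← hofd]
  apply Nat.digits_ofDigits 10 (by norm_num)
  · intro l hl
    rw [List.mem_flatten] at hl
    obtain ⟨bl, hbl, hlbl⟩ := hl
    rw [List.mem_replicate] at hbl
    rw [hbl.2] at hlbl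
    exact Nat.digits_lt_base (by norm_num) hlbl
  · intro h
    obtain ⟨k', rfl⟩ : ∃ k', k = k' + 1 := ⟨k - 1, by omega⟩
    simp only [pv_flatten_replicate_succ']
    rw [List.getLast_append_right hne]
    exact Nat.getLast_digit_ne_zero 10 hb0

theorem pv_map_CV_digits (m : Nat) :
    (Nat.digits 10 m).map (fun d => pvCV (Nat.digitChar d)) = Nat.digits 10 m := by
  conv_rhs => rw [← List.map_id (Nat.digits 10 m)]
  apply List.map_congr_left
  intro d hd
  exact pv_CV_digitChar d (Nat.digits_lt_base (by norm_num) hd)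

theorem pv_map_CV_BE (m : Nat) : (pvBE m).map pvCV = (Nat.digits 10 m).reverse := by
  unfold pvBE
  rw [List.map_reverse, List.map_map]
  rw [show (pvCV ∘ Nat.digitChar) = fun d => pvCV (Nat.digitChar d) from rfl, pv_map_CV_digits]

theorem pv_len_BE (m : Nat) : (pvBE m).length = (Nat.digits 10 m).length := by
  simp [pvBE]

theorem pv_BE_flatten (b i k : Nat) (hi : 1 ≤ i) (hk : 1 ≤ k)
    (hb1 : 10 ^ (i - 1) ≤ b) (hb2 : b < 10 ^ i) :
    pvBE (b * pvUnit i k) = (List.replicate k (pvBE b)).flatten := by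
  unfold pvBE
  rw [pv_digits_flatten b i k hi hk hb1 hb2, List.map_flatten, List.map_replicate,
    pv_reverse_flatten_replicate]

-- the central characterization: n ≥ 10 has a periodic decimal string iff it is block * repunit
theorem pv_per_iff_gen (n : Nat) (hn : 10 ≤ n) :
    pvPerS (pvBE n) ↔ ∃ i k b : Nat, 1 ≤ i ∧ 2 ≤ k ∧ 10 ^ (i - 1) ≤ b ∧ b < 10 ^ i ∧
      n = b * pvUnit i k ∧ i * k = (Nat.digits 10 n).length := by
  have hn0 : n ≠ 0 := by omega
  constructor
  · rintro ⟨i, k0, h1, h2, hk⟩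
    set s := pvBE n with hs
    have hil : i ≤ s.length := by omega
    have hplen : (s.take i).length = i := by rw [List.length_take]; omega
    have hslen : s.length = k0 * i := by
      have := congrArg List.length hk
      rwa [pv_flatten_replicate_length, hplen] at this
    have hk2 : 2 ≤ k0 := by nlinarith
    -- digits of n are k0 copies of the reversed block values
    set Ldb : List Nat := ((s.take i).map pvCV).reverse with hLdb
    have hLdblen : Ldb.length = i := by rw [hLdb]; simp; omega
    have hmapCV : s.map pvCV = (Nat.digits 10 n).reverse := pv_map_CV_BE n
    have hdigrev : Nat.digits 10 n = (s.map pvCV).reverse := by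
      rw [hmapCV, List.reverse_reverse]
    have hdig : Nat.digits 10 n = (List.replicate k0 Ldb).flatten := by
      rw [hdigrev]
      conv_lhs => rw [hk]
      rw [List.map_flatten, List.map_replicate, pv_reverse_flatten_replicate]
    -- every entry of Ldb is a decimal digit
    have hw1 : ∀ l ∈ Ldb, l < 10 := by
      intro l hl
      have hl' : l ∈ (s.take i).map pvCV := by
        rw [hLdb, List.mem_reverse] at hl; exact hl
      obtain ⟨c, hc, rfl⟩ := List.mem_map.mp hl'
      have hcs : c ∈ s := List.mem_of_mem_take hc
      have : pvCV c ∈ s.map pvCV := List.mem_map_of_mem hcs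
      rw [hmapCV, List.mem_reverse] at this
      exact Nat.digits_lt_base (by norm_num) this
    -- the last entry of Ldb (= the leading digit of n) is nonzero
    have hsne : s ≠ [] := by
      intro h; rw [h] at hslen; simp at hslen; omega
    have hLdbne : Ldb ≠ [] := by
      intro h; rw [h] at hLdblen; simp at hLdblen; omega
    have hw2 : ∀ (h : Ldb ≠ []), Ldb.getLast h ≠ 0 := by
      intro h
      have hdne : Nat.digits 10 n ≠ [] := pv_digits_ne_nil n hn0
      have hq : (Nat.digits 10 n).getLast? = some ((Nat.digits 10 n).getLast hdne) :=
        List.getLast?_eq_getLast hdne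
      have hq0 : (Nat.digits 10 n).getLast? ≠ some 0 := by
        rw [hq]
        intro hc
        exact Nat.getLast_digit_ne_zero 10 hn0 (Option.some.inj hc)
      obtain ⟨k', rfl⟩ : ∃ k', k0 = k' + 1 := ⟨k0 - 1, by omega⟩
      rw [hdig, pv_flatten_replicate_succ', List.getLast?_append_of_ne_nil _ h,
        List.getLast?_eq_getLast h] at hq0
      intro hc
      exact hq0 (by rw [hc])
    set b : Nat := Nat.ofDigits 10 Ldb with hb
    have hdigb : Nat.digits 10 b = Ldb := Nat.digits_ofDigits 10 (by norm_num) Ldb hw1 hw2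
    have hb0 : b ≠ 0 := by
      intro h
      apply hLdbne
      rw [← hdigb, h]
      simp
    have hneq : n = b * pvUnit i k0 := by
      conv_lhs => rw [← Nat.ofDigits_digits 10 n]
      rw [hdig, pv_ofDigits_flatten Ldb i k0 hLdblen]
    refine ⟨i, k0, b, h1, hk2, ?_, ?_, hneq, ?_⟩
    · have hlog : Nat.log 10 b = i - 1 := by
        have := Nat.digits_len 10 b (by norm_num) hb0
        rw [hdigb, hLdblen] at this
        omega
      rw [← hlog]
      exact Nat.pow_log_le_self 10 hb0
    · have := Nat.lt_base_pow_length_digits (b := 10) (m := b) (by norm_num)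
      rwa [hdigb, hLdblen] at this
    · rw [← pv_len_BE, ← hs, hslen]
      ring
  · rintro ⟨i, k, b, h1, hk2, hb1, hb2, hneq, hlen⟩
    have hBEb : (pvBE b).length = i := by
      rw [pv_len_BE]; exact pv_digits_len_eq b i h1 hb1 hb2
    have hflat : pvBE n = (List.replicate k (pvBE b)).flatten := by
      rw [hneq]; exact pv_BE_flatten b i k h1 (by omega) hb1 hb2
    have htake : (pvBE n).take i = pvBE b := by
      obtain ⟨k', rfl⟩ : ∃ k', k = k' + 1 := ⟨k - 1, by omega⟩
      rw [hflat, List.replicate_succ, List.flatten_cons, ← hBEb, List.take_left]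
    refine ⟨i, k, h1, ?_, by rw [htake]; exact hflat⟩
    · rw [pv_len_BE, ← hlen]
      nlinarith

-- numbers below ten (including negatives) are never periodic
theorem pv_small_not_per (x : Int) (hx : x < 10) : ¬ pvPerS (PySem.Int.toChars x) := by
  by_cases hneg : x < 0
  · have hm0 : 0 < x.natAbs := Int.natAbs_pos.mpr (by omega)
    have hs : PySem.Int.toChars x = '-' :: pvBE x.natAbs := by
      rw [PySem.Int.toChars, if_pos hneg, pv_toDigits_eq x.natAbs hm0]
      rfl
    rw [hs]
    set m := x.natAbs with hm
    rintro ⟨i, k, h1, h2, hk⟩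
    set s := '-' :: pvBE m with hsdef
    have hil : i ≤ s.length := by omega
    have hplen : (s.take i).length = i := by rw [List.length_take]; omega
    have hslen : s.length = k * i := by
      have := congrArg List.length hk
      rwa [pv_flatten_replicate_length, hplen] at this
    have hk2 : 2 ≤ k := by nlinarith
    obtain ⟨j, rfl⟩ : ∃ j, i = j + 1 := ⟨i - 1, by omega⟩
    obtain ⟨k'', rfl⟩ : ∃ k'', k = k'' + 2 := ⟨k - 2, by omega⟩
    have hsplit : s = s.take (j+1) ++ (s.take (j+1) ++ (List.replicate k'' (s.take (j+1))).flatten) := by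
      conv_lhs => rw [hk]
      simp [List.replicate_succ]
    have hdrop : s.drop (j+1) = s.take (j+1) ++ (List.replicate k'' (s.take (j+1))).flatten := by
      conv_lhs => rw [hsplit]
      exact List.drop_left' hplen
    have hp : s.take (j+1) = '-' :: (pvBE m).take j := by rw [hsdef, List.take_succ_cons]
    rw [hp, hsdef, List.drop_succ_cons] at hdrop
    have hdash : '-' ∈ (pvBE m).drop j := by
      rw [hdrop, List.cons_append]
      exact List.mem_cons_self
    have hBE : '-' ∈ pvBE m := List.mem_of_mem_drop hdash
    unfold pvBE at hBE
    rw [List.mem_reverse, List.mem_map] at hBE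
    obtain ⟨d, hd, hdc⟩ := hBE
    exact pv_digitChar_ne_dash d (Nat.digits_lt_base (by norm_num) hd) hdc
  · rw [not_lt] at hneg
    rintro ⟨i, k, h1, h2, hk⟩
    have hlen : (PySem.Int.toChars x).length = 1 := by
      interval_cases x <;> rfl
    omega

-- ---- set-fold membership machinery ----

theorem pv_mem_foldl_iff {β : Type} (l : List β) (step : PySem.Set Int → β → PySem.Set Int)
    (C : β → Int → Prop) (x : Int)
    (h : ∀ s e, e ∈ l → (x ∈ step s e ↔ x ∈ s ∨ C e x)) :
    ∀ s : PySem.Set Int, x ∈ l.foldl step s ↔ x ∈ s ∨ ∃ e ∈ l, C e x := by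
  induction l with
  | nil => simp
  | cons e t ih =>
      intro s
      rw [List.foldl_cons, ih (fun s e he => h s e (List.mem_cons_of_mem _ he)),
        h s e (List.mem_cons_self)]
      simp only [List.mem_cons]
      constructor
      · rintro ((hs | hc) | ⟨e', he', hc⟩)
        · exact Or.inl hs
        · exact Or.inr ⟨e, Or.inl rfl, hc⟩
        · exact Or.inr ⟨e', Or.inr he', hc⟩
      · rintro (hs | ⟨e', (rfl | he'), hc⟩)
        · exact Or.inl (Or.inl hs)
        · exact Or.inl (Or.inr hc)
        · exact Or.inr ⟨e', he', hc⟩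

theorem pv_nodup_foldl {β : Type} (l : List β) (step : PySem.Set Int → β → PySem.Set Int)
    (h : ∀ s e, s.Nodup → (step s e).Nodup) :
    ∀ s : PySem.Set Int, s.Nodup → (l.foldl step s).Nodup := by
  induction l with
  | nil => intro s hs; exact hs
  | cons e t ih => intro s hs; exact ih _ (h s e hs)

theorem pv_pyRange_one_pairwise (a b : Int) : (PySem.List.pyRange a b 1).Pairwise (· < ·) := by
  suffices H : ∀ n : Nat, ∀ a : Int, (b - a).toNat = n → (PySem.List.pyRange a b 1).Pairwise (· < ·) from
    H _ a rfl
  intro n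
  induction n with
  | zero =>
      intro a hn
      have hempty : PySem.List.pyRange a b 1 = [] := by
        rw [List.eq_nil_iff_forall_not_mem]
        intro x hx
        rw [PySem.List.mem_pyRange_one] at hx
        omega
      rw [hempty]
      exact List.Pairwise.nil
  | succ n ih =>
      intro a hn
      have hab : a < b := by omega
      rw [PySem.List.pyRange_one_cons hab]
      refine List.Pairwise.cons ?_ (ih (a + 1) (by omega))
      intro x hx
      rw [PySem.List.mem_pyRange_one] at hx
      omega

-- the candidate value and the loop conditions of B's generator, as Props
def pvN (L d block : Int) : Int := block * PySem.Int.floordiv (10 ^ L.toNat - 1) (10 ^ d.toNat - 1)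

def pvCB (lo stop L d block x : Int) : Prop :=
  (lo ≤ pvN L d block ∧ pvN L d block ≤ stop) ∧ x = pvN L d block

def pvCD (lo stop L d x : Int) : Prop :=
  PySem.Int.mod L d = 0 ∧
    ∃ block ∈ PySem.List.pyRange (10 ^ (d.toNat - 1)) (10 ^ d.toNat) 1, pvCB lo stop L d block x

def pvCL (lo stop L x : Int) : Prop :=
  ∃ d ∈ PySem.List.pyRange 1 (PySem.Int.floordiv L 2 + 1) 1, pvCD lo stop L d x

theorem pv_mem_found_raw (lo stop x : Int) :
    x ∈ pvFindRange lo stop ↔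
      ∃ L ∈ PySem.List.pyRange 2 (((PySem.Int.toChars stop).length : Int) + 1) 1,
        pvCL lo stop L x := by
  have hstepB : ∀ (L d : Int) (s : PySem.Set Int),
      x ∈ (PySem.List.pyRange (10 ^ (d.toNat - 1)) (10 ^ d.toNat) 1).foldl (fun found block =>
          let n := block * PySem.Int.floordiv (10 ^ L.toNat - 1) (10 ^ d.toNat - 1)
          if lo ≤ n ∧ n ≤ stop then PySem.Set.add found n else found) s
        ↔ x ∈ s ∨ ∃ block ∈ PySem.List.pyRange (10 ^ (d.toNat - 1)) (10 ^ d.toNat) 1,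
            pvCB lo stop L d block x := by
    intro L d s
    apply pv_mem_foldl_iff _ _ (fun block x => pvCB lo stop L d block x) x
    intro s' block _
    dsimp only
    unfold pvCB pvN
    split
    · rw [PySem.Set.mem_add]
      tauto
    · tauto
  have hstepD : ∀ (L : Int) (s : PySem.Set Int),
      x ∈ (PySem.List.pyRange 1 (PySem.Int.floordiv L 2 + 1) 1).foldl (fun found d =>
          if PySem.Int.mod L d = 0 then
            (PySem.List.pyRange (10 ^ (d.toNat - 1)) (10 ^ d.toNat) 1).foldl (fun found block =>
              let n := block * PySem.Int.floordiv (10 ^ L.toNat - 1) (10 ^ d.toNat - 1)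
              if lo ≤ n ∧ n ≤ stop then PySem.Set.add found n else found) found
          else found) s
        ↔ x ∈ s ∨ pvCL lo stop L x := by
    intro L s
    apply pv_mem_foldl_iff _ _ (fun d x => pvCD lo stop L d x) x
    intro s' d _
    dsimp only
    split
    · rename_i hmod
      rw [hstepB L d s']
      unfold pvCD
      tauto
    · rename_i hmod
      unfold pvCD
      tauto
  unfold pvFindRange
  refine Iff.trans (pv_mem_foldl_iff _ _ (fun L x => pvCL lo stop L x) x ?_ PySem.Set.empty) ?_
  · intro s L _
    exact hstepD L s
  · unfold PySem.Set.empty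
    simp

theorem pv_unitI (i k : Nat) (hi : 1 ≤ i) :
    PySem.Int.floordiv ((10:Int) ^ (i * k) - 1) ((10:Int) ^ i - 1) = (pvUnit i k : Int) := by
  have h10 : (10:Int) ≤ 10 ^ i := by
    calc (10:Int) = 10 ^ 1 := (pow_one 10).symm
    _ ≤ 10 ^ i := pow_le_pow_right₀ (by norm_num) hi
  have hpos : (0:Int) < 10 ^ i - 1 := by omega
  have hfac : (10:Int) ^ (i * k) - 1 = (10 ^ i - 1) * (pvUnit i k : Int) := by
    have hg := geom_sum_mul ((10:Int) ^ i) k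
    rw [← pow_mul] at hg
    have hcast : (pvUnit i k : Int) = ∑ j ∈ Finset.range k, ((10:Int) ^ i) ^ j := by
      unfold pvUnit; push_cast; rfl
    rw [hcast]
    linarith [hg]
  rw [hfac, PySem.Int.floordiv_eq_ediv_of_pos hpos, Int.mul_ediv_cancel_left _ (by omega)]

theorem pv_digits_len_mono (m n : Nat) (hm : m ≠ 0) (h : m ≤ n) :
    (Nat.digits 10 m).length ≤ (Nat.digits 10 n).length := by
  rw [Nat.digits_len 10 m (by norm_num) hm, Nat.digits_len 10 n (by norm_num) (by omega)]
  have := Nat.log_mono_right (b := 10) h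
  omega

theorem pv_mem_found (lo stop x : Int) (hlo : 10 ≤ lo) (hstop : lo ≤ stop) :
    x ∈ pvFindRange lo stop ↔ (lo ≤ x ∧ x ≤ stop ∧ pvPerS (PySem.Int.toChars x)) := by
  have hstopChars : PySem.Int.toChars stop = pvBE stop.toNat := by
    conv_lhs => rw [show stop = ((stop.toNat : Nat) : Int) by omega]
    exact pv_toChars_pos _ (by omega)
  have hmaxLen : ((PySem.Int.toChars stop).length : Int) = ((Nat.digits 10 stop.toNat).length : Int) := by
    rw [hstopChars, pv_len_BE]
  rw [pv_mem_found_raw]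
  constructor
  · rintro ⟨L, hL, d, hd, hmod, block, hblock, ⟨⟨hge, hle⟩, hx⟩⟩
    rw [PySem.List.mem_pyRange_one] at hL hd hblock
    obtain ⟨hL2, hLmax⟩ := hL
    obtain ⟨hd1, hd2⟩ := hd
    obtain ⟨hbl, hbu⟩ := hblock
    set i := d.toNat with hi
    have hi1 : 1 ≤ i := by omega
    have hd0 : (0:Int) < d := by omega
    have hL0 : (0:Int) < L := by omega
    have hdvd : d ∣ L := (PySem.Int.mod_eq_zero_iff_dvd L d).mp hmod
    obtain ⟨c, hc⟩ := hdvd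
    have hc0 : 0 < c := by nlinarith
    set k := c.toNat with hk
    have hLik : L.toNat = i * k := by
      have : (L.toNat : Int) = (i : Int) * (k : Int) := by
        rw [Int.toNat_of_nonneg (by omega), hi, hk, Int.toNat_of_nonneg (by omega),
          Int.toNat_of_nonneg (by omega)]
        exact hc
      exact_mod_cast this
    have hd2' : d * 2 ≤ L := by
      have := (PySem.Int.le_floordiv_iff_mul_le (a := L) (b := 2) (q := d) (by norm_num)).mp (by omega)
      omega
    have hk2 : 2 ≤ k := by
      have hc2 : 2 ≤ c := by nlinarith
      omega
    -- block bounds over Nat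
    have hbpos : (0:Int) < block := by
      have : (1:Int) ≤ 10 ^ (i - 1) := one_le_pow₀ (by norm_num)
      omega
    set b := block.toNat with hb
    have hbeq : (b : Int) = block := Int.toNat_of_nonneg (by omega)
    have hb1 : 10 ^ (i - 1) ≤ b := by
      have : ((10 ^ (i - 1) : Nat) : Int) ≤ (b : Int) := by rw [hbeq]; push_cast; exact hbl
      exact_mod_cast this
    have hb2 : b < 10 ^ i := by
      have : (b : Int) < ((10 ^ i : Nat) : Int) := by rw [hbeq]; push_cast; exact hbu
      exact_mod_cast this
    -- the generated value
    have hunit : PySem.Int.floordiv (10 ^ L.toNat - 1) (10 ^ i - 1) = (pvUnit i k : Int) := by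
      rw [hLik]; exact pv_unitI i k hi1
    have hxval : x = (block : Int) * (pvUnit i k : Int) := by
      rw [hx]; unfold pvN; rw [hunit]
    have hx10 : (10:Int) ≤ x := by
      rw [← hx] at hge; omega
    set n := x.toNat with hn
    have hneqI : (n : Int) = (b : Int) * (pvUnit i k : Int) := by
      rw [hn, Int.toNat_of_nonneg (by omega), hxval, hbeq]
    have hneq : n = b * pvUnit i k := by exact_mod_cast hneqI
    have hn10 : 10 ≤ n := by omega
    have hxchars : PySem.Int.toChars x = pvBE n := by
      conv_lhs => rw [show x = ((n : Nat) : Int) by omega]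
      exact pv_toChars_pos n (by omega)
    refine ⟨by rw [← hx] at hge; exact hge, by rw [← hx] at hle; exact hle, ?_⟩
    rw [hxchars]
    apply (pv_per_iff_gen n hn10).mpr
    refine ⟨i, k, b, hi1, hk2, hb1, hb2, hneq, ?_⟩
    have hdig : Nat.digits 10 n = (List.replicate k (Nat.digits 10 b)).flatten := by
      rw [hneq]; exact pv_digits_flatten b i k hi1 (by omega) hb1 hb2
    rw [hdig, pv_flatten_replicate_length, pv_digits_len_eq b i hi1 hb1 hb2]
    ring
  · rintro ⟨hge, hle, hper⟩
    have hx10 : (10:Int) ≤ x := by omega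
    set n := x.toNat with hn
    have hn10 : 10 ≤ n := by omega
    have hxchars : PySem.Int.toChars x = pvBE n := by
      conv_lhs => rw [show x = ((n : Nat) : Int) by omega]
      exact pv_toChars_pos n (by omega)
    rw [hxchars] at hper
    obtain ⟨i, k, b, hi1, hk2, hb1, hb2, hneq, hlen⟩ := (pv_per_iff_gen n hn10).mp hper
    have hunit : PySem.Int.floordiv (10 ^ ((i * k : Nat) : Int).toNat - 1)
        (10 ^ ((i : Nat) : Int).toNat - 1) = (pvUnit i k : Int) := by
      rw [Int.toNat_natCast, Int.toNat_natCast]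
      exact pv_unitI i k hi1
    have hNval : pvN ((i * k : Nat) : Int) ((i : Nat) : Int) ((b : Nat) : Int) = x := by
      unfold pvN
      rw [hunit]
      have hcast : ((b * pvUnit i k : Nat) : Int) = x := by
        rw [← hneq, hn]
        omega
      push_cast at hcast
      exact hcast
    refine ⟨((i * k : Nat) : Int), ?_, ((i : Nat) : Int), ?_, ?_, ((b : Nat) : Int), ?_, ?_, ?_⟩
    · rw [PySem.List.mem_pyRange_one]
      constructor
      · have : 2 ≤ i * k := by nlinarith
        exact_mod_cast this
      · rw [hmaxLen]
        have hmono : (Nat.digits 10 n).length ≤ (Nat.digits 10 stop.toNat).length :=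
          pv_digits_len_mono n stop.toNat (by omega) (by omega)
        have : i * k ≤ (Nat.digits 10 stop.toNat).length := by omega
        have hlt : ((i * k : Nat) : Int) < ((Nat.digits 10 stop.toNat).length : Int) + 1 := by
          exact_mod_cast Nat.lt_succ_of_le this
        exact hlt
    · rw [PySem.List.mem_pyRange_one]
      constructor
      · exact_mod_cast hi1
      · have h2 : ((i : Nat) : Int) * 2 ≤ ((i * k : Nat) : Int) := by
          push_cast
          nlinarith
        have := (PySem.Int.le_floordiv_iff_mul_le
          (a := ((i * k : Nat) : Int)) (b := 2) (q := ((i : Nat) : Int)) (by norm_num)).mpr h2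
        omega
    · rw [PySem.Int.mod_eq_zero_iff_dvd]
      exact ⟨(k : Int), by push_cast; ring⟩
    · rw [PySem.List.mem_pyRange_one, Int.toNat_natCast]
      constructor
      · exact_mod_cast hb1
      · exact_mod_cast hb2
    · constructor
      · rw [hNval]; exact hge
      · rw [hNval]; exact hle
    · rw [hNval]

theorem pv_nodup_found (lo stop : Int) : (pvFindRange lo stop).Nodup := by
  unfold pvFindRange
  apply pv_nodup_foldl
  · intro s L hs
    apply pv_nodup_foldl
    · intro s d hs
      split
      · apply pv_nodup_foldl
        · intro s block hs
          dsimp only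
          split
          · exact PySem.Set.nodup_add _ _ hs
          · exact hs
        · exact hs
      · exact hs
    · exact hs
  · exact List.nodup_nil

-- ---- per-range equality and assembly ----

-- A's per-range filter predicate
def pvPredA (pid : Int) : Bool :=
  pvInnerA (PySem.Int.toChars pid)
    (PySem.List.pyRange 1 (PySem.Int.floordiv (((PySem.Int.toChars pid).length : Nat) : Int) 2 + 1) 1)

theorem pv_range_eq (start stop : Int) :
    (PySem.List.pyRange start (stop + 1) 1).filter pvPredA
    = (if stop ≥ max start 10 then PySem.List.sorted (pvFindRange (max start 10) stop) (fun x => x) false else []) := by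
  set lo := max start 10 with hlo
  have hpair : (PySem.List.pyRange start (stop + 1) 1).Pairwise (· < ·) :=
    pv_pyRange_one_pairwise start (stop + 1)
  have hfilter : ((PySem.List.pyRange start (stop + 1) 1).filter pvPredA).Pairwise (· < ·) :=
    hpair.filter _
  by_cases hge : stop ≥ lo
  · rw [if_pos hge]
    symm
    apply PySem.List.sorted_eq_of_perm_of_pairwise_lt _ _ (fun x => x) _ hfilter
    rw [List.perm_ext_iff_of_nodup (hfilter.imp ne_of_lt) (pv_nodup_found lo stop)]
    intro a
    rw [List.mem_filter, PySem.List.mem_pyRange_one,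
      pv_mem_found lo stop a (by omega) hge]
    constructor
    · rintro ⟨⟨h1, h2⟩, hp⟩
      rw [pvPredA, pv_innerA_iff] at hp
      refine ⟨?_, by omega, hp⟩
      by_contra hlt
      exact pv_small_not_per a (by omega) hp
    · rintro ⟨h1, h2, hp⟩
      refine ⟨⟨by omega, by omega⟩, ?_⟩
      rw [pvPredA, pv_innerA_iff]
      exact hp
  · rw [if_neg hge, List.filter_eq_nil_iff]
    intro a ha
    rw [PySem.List.mem_pyRange_one] at ha
    rw [pvPredA]
    intro hc
    rw [pv_innerA_iff] at hc
    exact pv_small_not_per a (by omega) hc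

theorem pv_A_eq_alt (data : List (Int × Int)) : invalid_product_ids2 data = invalid_product_ids2_alt data := by
  have hA : ∀ (acc : List Int) (r : Int × Int),
      (PySem.List.pyRange r.1 (r.2 + 1) 1).foldl (fun acc pid =>
        let pidStr := PySem.Int.toChars pid
        let l : Int := pidStr.length
        if pvInnerA pidStr (PySem.List.pyRange 1 (PySem.Int.floordiv l 2 + 1) 1)
        then acc ++ [pid] else acc) acc
      = acc ++ (PySem.List.pyRange r.1 (r.2 + 1) 1).filter pvPredA := by
    intro acc r
    exact PySem.List.foldl_append_if_eq_filter pvPredA _ acc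
  have hLHS : invalid_product_ids2 data
      = data.flatMap (fun r => (PySem.List.pyRange r.1 (r.2 + 1) 1).filter pvPredA) := by
    unfold invalid_product_ids2
    refine Eq.trans (PySem.List.foldl_congr_mem _ _ _ _ (fun acc r _ => hA acc r)) ?_
    rw [PySem.List.foldl_append_eq_flatMap]
    simp
  have hRHS : invalid_product_ids2_alt data
      = data.flatMap (fun r : Int × Int => if r.2 ≥ max r.1 10 then
          PySem.List.sorted (pvFindRange (max r.1 10) r.2) (fun x => x) false else []) := by
    unfold invalid_product_ids2_alt
    have hB : ∀ (out : List Int) (r : Int × Int),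
        (let lo := max r.1 10
         if r.2 ≥ lo then
           out ++ PySem.List.sorted (pvFindRange lo r.2) (fun x => x) false
         else out)
        = out ++ (if r.2 ≥ max r.1 10 then
            PySem.List.sorted (pvFindRange (max r.1 10) r.2) (fun x => x) false else []) := by
      intro out r
      dsimp only
      split
      · rfl
      · rw [List.append_nil]
    refine Eq.trans (PySem.List.foldl_congr_mem _ _ _ _ (fun out r _ => hB out r)) ?_
    rw [PySem.List.foldl_append_eq_flatMap]
    simp
  rw [hLHS, hRHS]
  exact congrArg (fun g => List.flatMap g data) (funext fun r => pv_range_eq r.1 r.2)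

-- ===== VERDICT (by name: the statement is the Claim_ definition above) =====
theorem invalid_product_ids2_spec : Claim_equal_invalid_product_ids2 := by
  intro data _
  unfold Spec_invalid_product_ids2
  exact pv_A_eq_alt data
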